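-- pv_equiv track=rewrite | github.com/pypi-data/pypi-mirror-392 | packages/logsage/logsage-0.1.1-py3-none-any.whl/logsage/auto_resume_policy/utils.py | round_robin_ordering
-- ===== SOURCE A (Python) =====
-- from collections import Counter, defaultdict
--
-- def round_robin_ordering(data: list | None = None) -> list:
--     """Helper function to convert dict to text
--
--     Args:
--         data: list
--
--     Returns:
--         list
--     """
--     if data is None:
--         data = []
--
--     node_dict = defaultdict(list)
--
--     # Parse input and group texts by node
--     for line in data:
--         if ": " in line:
--             node, text = line.split(": ", 1)
--             node_dict[node].append(text)
--
--     # Create round-robin order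
--     result = []
--     while any(node_dict.values()):
--         for node in list(node_dict.keys()):
--             if node_dict[node]:
--                 result.append(f"{node}: {node_dict[node].pop(0)}")
--
--     return result
-- ===== SOURCE B (Python) =====
-- def round_robin_ordering(data: list | None = None) -> list:
--     """Round-robin interleave "node: text" lines by node (index-based rounds)."""
--     if data is None:
--         data = []
--     order = []
--     groups = {}
--     for line in data:
--         if ": " in line:
--             node, text = line.split(": ", 1)
--             if node not in groups:
--                 order.append(node)
--                 groups[node] = []
--             groups[node].append(text)
--     maxlen = max(map(len, groups.values()), default=0)
--     return [f"{node}: {groups[node][r]}"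
--             for r in range(maxlen)
--             for node in order
--             if r < len(groups[node])]
-- ===== Notes on version B (the rewrite author's own statement) =====
-- stated objective: alternative
-- what changed: A repeatedly sweeps the node dict with a while-any loop, destructively popping each list's head with pop(0); B groups once, computes the maximum group length, and emits round r per node by direct indexing texts[r] in a single comprehension (no mutation, no repeated any() scans).
import Mathlib
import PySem

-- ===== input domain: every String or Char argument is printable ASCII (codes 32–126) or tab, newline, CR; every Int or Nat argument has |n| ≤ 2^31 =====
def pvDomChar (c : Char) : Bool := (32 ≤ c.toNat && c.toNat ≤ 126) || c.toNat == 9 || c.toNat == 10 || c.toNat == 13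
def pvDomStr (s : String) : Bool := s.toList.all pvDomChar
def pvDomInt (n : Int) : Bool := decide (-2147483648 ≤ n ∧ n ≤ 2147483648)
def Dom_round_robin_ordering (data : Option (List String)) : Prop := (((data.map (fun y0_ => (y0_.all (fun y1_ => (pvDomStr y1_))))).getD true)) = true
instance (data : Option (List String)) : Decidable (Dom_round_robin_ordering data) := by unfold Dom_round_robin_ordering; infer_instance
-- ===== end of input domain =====

-- B replaces A's destructive while-any/pop(0) sweeps over the dict by index-based rounds:
-- group once, then emit texts[r] per node for r in range(maxlen); same return value.

-- ===== PORT A =====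
-- grouping loop: `for line in data: if ": " in line: node, text = line.split(": ", 1); node_dict[node].append(text)`
def rrParseStep (d : PySem.Dict String (List String)) (line : String) : PySem.Dict String (List String) :=
  if PySem.Str.isIn ": " line then
    match PySem.Str.splitMax? line ": " 1 with
    | some [node, text] => d.modify node [] (· ++ [text])
    | _ => d                    -- unreachable: split(": ", 1) with ": " in line gives exactly 2 parts
  else d

-- one pass of `for node in list(node_dict.keys()): if node_dict[node]: result.append(f"..."); pop(0)`
def rrRound (d : PySem.Dict String (List String)) (acc : List String) :
    PySem.Dict String (List String) × List String :=
  d.keys.foldl (fun st node =>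
    match st.1.getD node [] with
    | [] => st
    | t :: ts => (st.1.insert node ts, st.2 ++ [node ++ ": " ++ t])) (d, acc)

def rrTotal (d : PySem.Dict String (List String)) : Nat := (d.values.map List.length).sum

-- `while any(node_dict.values()):` — fuel-guarded (rrTotal d is enough fuel: each pass pops ≥ 1)
def rrLoop : Nat → PySem.Dict String (List String) → List String → List String
  | 0, _, acc => acc
  | fuel + 1, d, acc =>
    if d.values.any (fun v => !v.isEmpty) then
      let st := rrRound d acc
      rrLoop fuel st.1 st.2
    else acc

def round_robin_ordering (data : Option (List String)) : List String :=
  let data := data.getD []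
  let nd := data.foldl rrParseStep PySem.Dict.empty
  rrLoop (rrTotal nd) nd []

-- ===== PORT B =====
-- B's grouping loop, carrying (order, groups)
def rrAltParseStep (st : List String × PySem.Dict String (List String)) (line : String) :
    List String × PySem.Dict String (List String) :=
  if PySem.Str.isIn ": " line then
    match PySem.Str.splitMax? line ": " 1 with
    | some [node, text] =>
      let st := if st.2.contains node then st else (st.1 ++ [node], st.2.insert node [])
      (st.1, st.2.modify node [] (· ++ [text]))
    | _ => st
  else st

def round_robin_ordering_alt (data : Option (List String)) : List String :=
  let data := data.getD []
  let st := data.foldl rrAltParseStep ([], PySem.Dict.empty)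
  let order := st.1
  let groups := st.2
  -- max(map(len, groups.values()), default=0)
  let maxlen : Int := PySem.List.maxD (groups.values.map (fun v => (v.length : Int))) (fun x => x) 0
  -- [f"{node}: {groups[node][r]}" for r in range(maxlen) for node in order if r < len(groups[node])]
  (PySem.List.pyRange 0 maxlen 1).flatMap (fun r =>
    order.filterMap (fun node =>
      let texts := groups.getD node []
      if r < (texts.length : Int) then some (node ++ ": " ++ PySem.List.pyGetD texts r "") else none))

-- ===== PRECONDITION & SPEC =====
def Spec_round_robin_ordering (data : Option (List String)) (out : List String) : Prop := out = round_robin_ordering_alt data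
instance (data : Option (List String)) (out : List String) : Decidable (Spec_round_robin_ordering data out) := by unfold Spec_round_robin_ordering; infer_instance

-- ===== CLAIM (what is proved, stated in full; the proofs are below) =====
def Claim_equal_round_robin_ordering : Prop := ∀ (data : Option (List String)), Dom_round_robin_ordering data → Spec_round_robin_ordering data (round_robin_ordering data)

-- ===== LEMMAS AND PROOFS =====

-- proof-side abstractions over the dict's item list
def rrTailE (p : String × List String) : String × List String := (p.1, p.2.tail)

def rrEmitAt (r : Nat) (ps : List (String × List String)) : List String :=
  ps.filterMap (fun p => p.2[r]?.map (fun t => p.1 ++ ": " ++ t))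

def rrMax (ps : List (String × List String)) : Nat := (ps.map (fun p => p.2.length)).foldl max 0

def rrRounds : Nat → List (String × List String) → List String
  | 0, _ => []
  | m + 1, ps => rrEmitAt 0 ps ++ rrRounds m (ps.map rrTailE)

lemma rr_alt_step (d : PySem.Dict String (List String)) (line : String) :
    rrAltParseStep (d.keys, d) line = ((rrParseStep d line).keys, rrParseStep d line) := by
  unfold rrAltParseStep rrParseStep
  by_cases hin : PySem.Str.isIn ": " line
  · simp only [hin, if_true]
    cases hs : PySem.Str.splitMax? line ": " 1 with
    | none => rfl
    | some parts =>
      match parts with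
      | [] => rfl
      | [x] => rfl
      | [node, text] =>
        simp only
        by_cases hc : d.contains node
        · simp only [hc, if_true]
          rw [PySem.Dict.keys_modify]
          rw [PySem.Dict.keys_insert_of_contains _ _ hc]
        · simp only [hc, if_false, Bool.false_eq_true]
          have hmod : (d.insert node []).modify node [] (· ++ [text]) = d.modify node [] (· ++ [text]) := by
            unfold PySem.Dict.modify
            rw [PySem.Dict.getD_insert_self, PySem.Dict.insert_insert_self,
                PySem.Dict.getD_of_not_contains d [] (by simpa using hc)]
          rw [hmod, Prod.mk.injEq]
          refine ⟨?_, rfl⟩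
          unfold PySem.Dict.modify
          rw [PySem.Dict.keys_insert_of_not_contains _ _ (by simpa using hc)]
      | x :: y :: z :: rest => rfl
  · simp only [if_neg hin]

-- parse states of A and B stay in lockstep: B's order list is exactly the keys of A's dict
lemma rr_parse_rel (lines : List String) (os : List String) (d : PySem.Dict String (List String))
    (h : os = d.keys) :
    lines.foldl rrAltParseStep (os, d) = ((lines.foldl rrParseStep d).keys, lines.foldl rrParseStep d) := by
  subst h
  induction lines generalizing d with
  | nil => rfl
  | cons line lines ih =>
    simp only [List.foldl_cons]
    rw [rr_alt_step, ih]
lemma rr_parse_nodup (lines : List String) (d : PySem.Dict String (List String))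
    (h : d.keys.Nodup) : (lines.foldl rrParseStep d).keys.Nodup := by
  induction lines generalizing d with
  | nil => exact h
  | cons line lines ih =>
    simp only [List.foldl_cons]
    apply ih
    unfold rrParseStep
    by_cases hin : PySem.Str.isIn ": " line
    · simp only [hin, if_true]
      cases hs : PySem.Str.splitMax? line ": " 1 with
      | none => exact h
      | some parts =>
        match parts with
        | [] => exact h
        | [x] => exact h
        | [node, text] => exact PySem.Dict.nodup_keys_insert _ _ _ h
        | x :: y :: z :: rest => exact h
    · simp only [if_neg hin]; exact h
lemma rr_get?_mk_middle (pre suf : List (String × List String)) (k : String) (l : List String)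
    (h : k ∉ pre.map Prod.fst) :
    (PySem.Dict.mk (pre ++ (k, l) :: suf)).get? k = some l := by
  induction pre with
  | nil => simp [PySem.Dict.get?_mk_cons]
  | cons q pre ih =>
    simp only [List.map_cons, List.mem_cons] at h
    push Not at h
    rw [List.cons_append, PySem.Dict.get?_mk_cons]
    rw [if_neg (by simpa using (Ne.symm h.1))]
    exact ih h.2
lemma rr_insert_mk_middle (pre suf : List (String × List String)) (k : String) (l v : List String)
    (h1 : k ∉ pre.map Prod.fst) (h2 : k ∉ suf.map Prod.fst) :
    (PySem.Dict.mk (pre ++ (k, l) :: suf)).insert k v = PySem.Dict.mk (pre ++ (k, v) :: suf) := by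
  have hc : (PySem.Dict.mk (pre ++ (k, l) :: suf)).contains k = true := by
    rw [PySem.Dict.contains_eq_isSome_get?, rr_get?_mk_middle pre suf k l h1]
    rfl
  apply PySem.Dict.ext
  rw [PySem.Dict.items_insert_of_contains _ v hc]
  show List.map _ (pre ++ (k, l) :: suf) = pre ++ (k, v) :: suf
  rw [List.map_append, List.map_cons]
  congr 1
  · conv_rhs => rw [← List.map_id pre]
    apply List.map_congr_left
    intro p hp
    rw [if_neg]
    · rfl
    · simp only [beq_iff_eq]
      intro he; exact h1 (he ▸ List.mem_map_of_mem hp)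
  · rw [if_pos (by simp)]
    congr 1
    conv_rhs => rw [← List.map_id suf]
    apply List.map_congr_left
    intro p hp
    rw [if_neg]
    · rfl
    · simp only [beq_iff_eq]
      intro he; exact h2 (he ▸ List.mem_map_of_mem hp)
lemma rr_round_go (post pre : List (String × List String)) (acc : List String)
    (h : ((pre ++ post).map Prod.fst).Nodup) :
    (post.map Prod.fst).foldl (fun st node =>
        match st.1.getD node [] with
        | [] => st
        | t :: ts => (st.1.insert node ts, st.2 ++ [node ++ ": " ++ t]))
      (PySem.Dict.mk (pre ++ post), acc)
    = (PySem.Dict.mk (pre ++ post.map rrTailE), acc ++ rrEmitAt 0 post) := by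
  induction post generalizing pre acc with
  | nil => simp [rrEmitAt]
  | cons p post ih =>
    obtain ⟨k, l⟩ := p
    have h' : (pre.map Prod.fst ++ k :: post.map Prod.fst).Nodup := by simpa using h
    have hkpre : k ∉ pre.map Prod.fst := by
      intro hk
      exact (List.disjoint_of_nodup_append h') hk (by simp)
    have hkpost : k ∉ post.map Prod.fst := by
      have := (List.nodup_append.mp h').2.1
      exact (List.nodup_cons.mp this).1
    have hget : (PySem.Dict.mk (pre ++ (k, l) :: post)).getD k [] = l := by
      rw [PySem.Dict.getD_eq_get?_getD, rr_get?_mk_middle _ _ _ _ hkpre]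
      rfl
    simp only [List.map_cons, List.foldl_cons, hget]
    cases l with
    | nil =>
      have hrw : pre ++ (k, ([] : List String)) :: post = (pre ++ [(k, [])]) ++ post := by
        simp
      rw [hrw, ih (pre ++ [(k, [])]) acc (by rw [← hrw]; exact h)]
      rw [Prod.mk.injEq]
      constructor
      · apply PySem.Dict.ext
        show (pre ++ [(k, [])]) ++ post.map rrTailE = pre ++ ((k, []) :: post).map rrTailE
        simp [rrTailE]
      · simp [rrEmitAt]
    | cons t ts =>
      dsimp only
      rw [rr_insert_mk_middle pre post k (t :: ts) ts hkpre hkpost]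
      have hrw : pre ++ (k, ts) :: post = (pre ++ [(k, ts)]) ++ post := by simp
      have hnd2 : (((pre ++ [(k, ts)]) ++ post).map Prod.fst).Nodup := by
        rw [← hrw]
        simpa using h'
      rw [hrw, ih (pre ++ [(k, ts)]) (acc ++ [k ++ ": " ++ t]) hnd2]
      rw [Prod.mk.injEq]
      constructor
      · apply PySem.Dict.ext
        show (pre ++ [(k, ts)]) ++ post.map rrTailE = pre ++ ((k, t :: ts) :: post).map rrTailE
        simp [rrTailE]
      · simp [rrEmitAt]
lemma rr_round_eq (ps : List (String × List String)) (acc : List String)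
    (h : (ps.map Prod.fst).Nodup) :
    rrRound (PySem.Dict.mk ps) acc = (PySem.Dict.mk (ps.map rrTailE), acc ++ rrEmitAt 0 ps) := by
  have := rr_round_go ps [] acc (by simpa using h)
  simpa [rrRound, PySem.Dict.keys] using this
lemma rr_total_tail_lt (ps : List (String × List String))
    (h : ∃ p ∈ ps, p.2 ≠ []) :
    ((ps.map rrTailE).map (fun p => p.2.length)).sum < (ps.map (fun p => p.2.length)).sum := by
  induction ps with
  | nil => simp at h
  | cons p ps ih =>
    simp only [List.map_cons, List.sum_cons]
    have htl : (rrTailE p).2.length = p.2.length - 1 := by simp [rrTailE]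
    have hle : ∀ qs : List (String × List String),
        ((qs.map rrTailE).map (fun p => p.2.length)).sum ≤ (qs.map (fun p => p.2.length)).sum := by
      intro qs; induction qs with
      | nil => simp
      | cons q qs ih2 =>
        simp only [List.map_cons, List.sum_cons]
        have : (rrTailE q).2.length = q.2.length - 1 := by simp [rrTailE]
        omega
    rcases h with ⟨q, hq, hne⟩
    rcases List.mem_cons.mp hq with rfl | hq'
    · have h1 : 1 ≤ q.2.length := by cases hl : q.2 with | nil => exact absurd hl hne | cons a t => simp
      have := hle ps; omega
    · have := ih ⟨q, hq', hne⟩; omega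
lemma rr_foldl_max_acc (a : Nat) (xs : List Nat) : xs.foldl max a = max a (xs.foldl max 0) := by
  induction xs generalizing a with
  | nil => simp
  | cons x xs ih =>
    simp only [List.foldl_cons]
    rw [ih (max a x), ih (max 0 x)]
    omega
lemma rr_max_cons (x : Nat) (xs : List Nat) : (x :: xs).foldl max 0 = max x (xs.foldl max 0) := by
  simp only [List.foldl_cons]; rw [rr_foldl_max_acc]; omega
lemma rr_max_zero_of_all_nil (ps : List (String × List String))
    (h : ∀ p ∈ ps, p.2 = []) : rrMax ps = 0 := by
  induction ps with
  | nil => rfl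
  | cons p ps ih =>
    have hp := h p (by simp)
    unfold rrMax at *
    simp only [List.map_cons, rr_max_cons]
    rw [ih (fun q hq => h q (by simp [hq]))]
    simp [hp]
lemma rr_max_tail (ps : List (String × List String)) :
    rrMax (ps.map rrTailE) = rrMax ps - 1 := by
  induction ps with
  | nil => rfl
  | cons p ps ih =>
    unfold rrMax at *
    simp only [List.map_cons, rr_max_cons] at *
    rw [ih]
    have : (rrTailE p).2.length = p.2.length - 1 := by simp [rrTailE]
    rw [this]; omega
lemma rr_max_pos (ps : List (String × List String)) (h : ∃ p ∈ ps, p.2 ≠ []) : 1 ≤ rrMax ps := by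
  induction ps with
  | nil => simp at h
  | cons p ps ih =>
    unfold rrMax at *
    simp only [List.map_cons, rr_max_cons]
    rcases h with ⟨q, hq, hne⟩
    rcases List.mem_cons.mp hq with rfl | hq'
    · have h1 : 1 ≤ q.2.length := by
        cases hl : q.2 with | nil => exact absurd hl hne | cons a t => simp
      omega
    · have := ih ⟨q, hq', hne⟩; omega
lemma rr_loop_eq (fuel : Nat) (ps : List (String × List String)) (acc : List String)
    (hnd : (ps.map Prod.fst).Nodup) (hfuel : (ps.map (fun p => p.2.length)).sum ≤ fuel) :
    rrLoop fuel (PySem.Dict.mk ps) acc = acc ++ rrRounds (rrMax ps) ps := by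
  induction fuel generalizing ps acc with
  | zero =>
    have hall : ∀ p ∈ ps, p.2 = [] := by
      intro p hp
      have hmem : p.2.length ∈ ps.map (fun p => p.2.length) := List.mem_map_of_mem hp
      have := List.single_le_sum (l := ps.map (fun p => p.2.length)) (fun x _ => Nat.zero_le x) _ hmem
      have hz : p.2.length = 0 := by omega
      exact List.eq_nil_of_length_eq_zero hz
    rw [rr_max_zero_of_all_nil ps hall]
    simp [rrLoop, rrRounds]
  | succ fuel ih =>
    show (if (PySem.Dict.mk ps).values.any (fun v => !v.isEmpty) then _ else acc) = _
    have hvals : (PySem.Dict.mk ps).values = ps.map Prod.snd := rfl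
    by_cases hc : (ps.map Prod.snd).any (fun v => !v.isEmpty)
    · rw [if_pos (by rw [hvals]; exact hc)]
      have hex : ∃ p ∈ ps, p.2 ≠ [] := by
        rcases List.any_eq_true.mp hc with ⟨v, hv, hne⟩
        rcases List.mem_map.mp hv with ⟨p, hp, rfl⟩
        exact ⟨p, hp, by simpa using hne⟩
      show rrLoop fuel (rrRound (PySem.Dict.mk ps) acc).1 (rrRound (PySem.Dict.mk ps) acc).2 = _
      rw [rr_round_eq ps acc hnd]
      have hnd2 : ((ps.map rrTailE).map Prod.fst).Nodup := by
        rw [List.map_map]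
        simpa [Function.comp, rrTailE] using hnd
      have hlt := rr_total_tail_lt ps hex
      rw [ih (ps.map rrTailE) (acc ++ rrEmitAt 0 ps) hnd2 (by omega)]
      rw [rr_max_tail]
      have hpos := rr_max_pos ps hex
      rw [show rrMax ps = (rrMax ps - 1) + 1 by omega]
      show acc ++ rrEmitAt 0 ps ++ rrRounds (rrMax ps - 1 + 1 - 1) (ps.map rrTailE)
          = acc ++ (rrEmitAt 0 ps ++ rrRounds (rrMax ps - 1) (ps.map rrTailE))
      have h3 : rrMax ps - 1 + 1 - 1 = rrMax ps - 1 := by omega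
      rw [h3, List.append_assoc]
    · rw [if_neg (by rw [hvals]; exact hc)]
      have hall : ∀ p ∈ ps, p.2 = [] := by
        intro p hp
        by_contra hne
        exact hc (List.any_eq_true.mpr ⟨p.2, List.mem_map_of_mem hp, by simpa using hne⟩)
      rw [rr_max_zero_of_all_nil ps hall]
      simp [rrRounds]
lemma rr_emitAt_tail (r : Nat) (ps : List (String × List String)) :
    rrEmitAt r (ps.map rrTailE) = rrEmitAt (r + 1) ps := by
  unfold rrEmitAt
  rw [List.filterMap_map]
  apply List.filterMap_congr
  intro p _
  simp [rrTailE, List.getElem?_tail]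
lemma rr_rounds_eq_flatMap (m : Nat) (ps : List (String × List String)) :
    rrRounds m ps = (List.range m).flatMap (fun r => rrEmitAt r ps) := by
  induction m generalizing ps with
  | zero => simp [rrRounds]
  | succ m ih =>
    rw [List.range_succ_eq_map]
    simp only [List.flatMap_cons, List.flatMap_map]
    rw [rrRounds, ih]
    congr 1
    apply List.flatMap_congr
    intro r _
    exact rr_emitAt_tail r ps
lemma rr_foldl_max_cast (xs : List Nat) (a : Nat) :
    (xs.map (fun n : Nat => (n : Int))).foldl max (a : Int) = ((xs.foldl max a : Nat) : Int) := by
  induction xs generalizing a with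
  | nil => simp
  | cons x xs ih => simp_all [← Nat.cast_max]
lemma rr_maxD_eq (ps : List (String × List String)) :
    PySem.List.maxD ((ps.map Prod.snd).map (fun v => (v.length : Int))) (fun x => x) 0
      = (rrMax ps : Int) := by
  cases ps with
  | nil => rfl
  | cons p ps =>
    have hmm : (ps.map Prod.snd).map (fun v => (v.length : Int))
        = (ps.map (fun p => p.2.length)).map (fun n : Nat => (n : Int)) := by
      simp [List.map_map]
    simp only [List.map_cons]
    unfold PySem.List.maxD
    rw [PySem.List.max?_id_cons]
    show (((ps.map Prod.snd).map (fun v => (v.length : Int))).foldl max ((p.2.length : Nat) : Int)) = _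
    rw [hmm, rr_foldl_max_cast]
    unfold rrMax
    rw [List.map_cons, rr_max_cons, rr_foldl_max_acc p.2.length]
lemma rr_alt_eq (ps : List (String × List String)) (hnd : (ps.map Prod.fst).Nodup) :
    ((PySem.List.pyRange 0 ((rrMax ps : Nat) : Int) 1).flatMap (fun r =>
      (ps.map Prod.fst).filterMap (fun node =>
        let texts := (PySem.Dict.mk ps).getD node []
        if r < (texts.length : Int) then some (node ++ ": " ++ PySem.List.pyGetD texts r "") else none)))
    = (List.range (rrMax ps)).flatMap (fun r => rrEmitAt r ps) := by
  rw [PySem.List.pyRange_zero_nat, List.flatMap_map]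
  apply List.flatMap_congr
  intro r _
  rw [List.filterMap_map]
  unfold rrEmitAt
  apply List.filterMap_congr
  intro p hp
  simp only [Function.comp_apply]
  have hget : (PySem.Dict.mk ps).getD p.1 [] = p.2 := by
    apply PySem.Dict.getD_of_mem_items
    · show (p.1, p.2) ∈ ps
      simpa using hp
    · show (ps.map Prod.fst).Nodup
      exact hnd
  simp only [hget]
  by_cases hr : r < p.2.length
  · rw [if_pos (by exact_mod_cast hr)]
    rw [PySem.List.pyGetD_natCast]
    rw [List.getElem?_eq_getElem hr]
    rw [List.getD_eq_getElem?_getD, List.getElem?_eq_getElem hr]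
    rfl
  · rw [if_neg (by exact_mod_cast hr)]
    rw [List.getElem?_eq_none (by omega)]
    rfl
-- ===== VERDICT (by name: the statement is the Claim_ definition above) =====
theorem round_robin_ordering_spec : Claim_equal_round_robin_ordering := by
  unfold Claim_equal_round_robin_ordering
  intro data _
  simp only [Spec_round_robin_ordering, round_robin_ordering, round_robin_ordering_alt]
  have hb := rr_parse_rel (data.getD []) [] PySem.Dict.empty (by rw [PySem.Dict.keys_empty])
  rw [hb]
  have hnodup : ((data.getD []).foldl rrParseStep PySem.Dict.empty).keys.Nodup :=
    rr_parse_nodup _ _ PySem.Dict.nodup_keys_empty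
  generalize (data.getD []).foldl rrParseStep PySem.Dict.empty = nd at hb hnodup ⊢
  obtain ⟨ps⟩ := nd
  have hnodup' : (ps.map Prod.fst).Nodup := hnodup
  have htot : rrTotal (PySem.Dict.mk ps) = (ps.map (fun p => p.2.length)).sum := by
    simp [rrTotal, PySem.Dict.values, List.map_map, Function.comp_def]
  show rrLoop (rrTotal (PySem.Dict.mk ps)) (PySem.Dict.mk ps) [] = _
  rw [htot, rr_loop_eq _ ps [] hnodup' le_rfl, List.nil_append, rr_rounds_eq_flatMap]
  show _ = (PySem.List.pyRange 0
      (PySem.List.maxD (((PySem.Dict.mk ps).values).map (fun v => (v.length : Int))) (fun x => x) 0) 1).flatMap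
      (fun r => ((PySem.Dict.mk ps).keys).filterMap (fun node =>
        let texts := (PySem.Dict.mk ps).getD node []
        if r < (texts.length : Int) then some (node ++ ": " ++ PySem.List.pyGetD texts r "") else none))
  have hvals : (PySem.Dict.mk ps).values = ps.map Prod.snd := rfl
  have hkeys : (PySem.Dict.mk ps).keys = ps.map Prod.fst := rfl
  rw [hvals, hkeys, rr_maxD_eq]
  exact (rr_alt_eq ps hnodup').symm
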